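-- pv_equiv track=rewrite | github.com/AIINSTARAJ/SCRAPX | res.py | dds
-- ===== SOURCE A (Python) =====
-- def dds(lst):
--     result = 0
--     for i in range(len(lst)):
--         if i % 2 == 0:
--             result += lst[i]
--         else:
--             result -= lst[i]
--         result *= 2
--     return result
-- ===== SOURCE B (Python) =====
-- def dds(lst):
--     total = 0
--     weight = 2
--     sign = 1 if (len(lst) - 1) % 2 == 0 else -1
--     for x in reversed(lst):
--         total += sign * x * weight
--         weight *= 2
--         sign = -sign
--     return total
-- ===== Notes on version B (the rewrite author's own statement) =====
-- stated objective: alternative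
-- what changed: Traverses the list back-to-front summing sign*x*weight with a doubling weight and alternating sign, instead of A's front-to-back Horner-style doubling accumulator.
import Mathlib
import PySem

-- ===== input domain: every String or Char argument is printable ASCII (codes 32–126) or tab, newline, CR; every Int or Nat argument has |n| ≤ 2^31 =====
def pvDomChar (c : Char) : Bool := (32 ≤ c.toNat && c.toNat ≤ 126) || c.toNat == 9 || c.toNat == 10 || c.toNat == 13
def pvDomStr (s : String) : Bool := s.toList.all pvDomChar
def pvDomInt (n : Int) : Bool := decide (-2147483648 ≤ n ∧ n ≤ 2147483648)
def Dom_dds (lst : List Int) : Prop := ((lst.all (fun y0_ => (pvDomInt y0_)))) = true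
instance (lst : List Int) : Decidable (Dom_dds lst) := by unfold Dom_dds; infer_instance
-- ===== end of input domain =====

-- B traverses the list back-to-front with a doubling weight and alternating sign instead of A's front-to-back doubling accumulator; same O(n) cost, different traversal.

-- ===== PORT A =====
-- literal port of A's loop: for i in range(len(lst)): result ±= lst[i]; result *= 2
def dds (lst : List Int) : Int :=
  (List.range lst.length).foldl
    (fun result i => (if i % 2 == 0 then result + lst.getD i 0 else result - lst.getD i 0) * 2)
    0

-- ===== PORT B =====
-- literal port of B: total/weight/sign state, for x in reversed(lst): total += sign*x*weight; weight *= 2; sign = -sign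
def dds_alt (lst : List Int) : Int :=
  (lst.reverse.foldl
    (fun (st : Int × Int × Int) x => (st.1 + st.2.2 * x * st.2.1, st.2.1 * 2, -st.2.2))
    (0, 2, if ((lst.length : Int) - 1) % 2 == 0 then (1 : Int) else -1)).1

-- ===== PRECONDITION & SPEC =====
def Spec_dds (lst : List Int) (out : Int) : Prop := out = dds_alt lst
instance (lst : List Int) (out : Int) : Decidable (Spec_dds lst out) := by unfold Spec_dds; infer_instance

-- ===== CLAIM (what is proved, stated in full; the proofs are below) =====
def Claim_equal_dds : Prop := ∀ (lst : List Int), Dom_dds lst → Spec_dds lst (dds lst)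

-- ===== LEMMAS AND PROOFS =====

-- reference sum of B's loop: h ys w = Σ alternating-signed ys[j] * w * 2^j
def ddsH : List Int → Int → Int
  | [], _ => 0
  | x :: ys, w => x * w - ddsH ys (2 * w)

theorem ddsH_double (ys : List Int) : ∀ w : Int, ddsH ys (2 * w) = 2 * ddsH ys w := by
  induction ys with
  | nil => intro w; simp [ddsH]
  | cons x ys ih =>
    intro w
    simp only [ddsH]
    rw [show (2 : Int) * (2 * w) = 2 * (2 * w) from rfl, ih (2 * w)]
    ring

theorem ddsB_fold (ys : List Int) : ∀ (t w s : Int),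
    (ys.foldl
      (fun (st : Int × Int × Int) x => (st.1 + st.2.2 * x * st.2.1, st.2.1 * 2, -st.2.2))
      (t, w, s)).1 = t + s * ddsH ys w := by
  induction ys with
  | nil => intro t w s; simp [ddsH]
  | cons x ys ih =>
    intro t w s
    simp only [List.foldl_cons]
    rw [ih (t + s * x * w) (w * 2) (-s)]
    have hd : ddsH ys (w * 2) = 2 * ddsH ys w := by
      rw [mul_comm w 2]; exact ddsH_double ys w
    have hd2 : ddsH ys (2 * w) = 2 * ddsH ys w := ddsH_double ys w
    simp only [ddsH]
    rw [hd, hd2]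
    ring

theorem dds_alt_closed (lst : List Int) :
    dds_alt lst
      = (if ((lst.length : Int) - 1) % 2 == 0 then (1 : Int) else -1) * ddsH lst.reverse 2 := by
  unfold dds_alt
  rw [ddsB_fold]
  ring

theorem ddsA_congr (l : List Int) (x : Int) : ∀ (m : Nat), m ≤ l.length → ∀ (init : Int),
    (List.range m).foldl
      (fun result i => (if i % 2 == 0 then result + (l ++ [x]).getD i 0
                        else result - (l ++ [x]).getD i 0) * 2) init
    = (List.range m).foldl
      (fun result i => (if i % 2 == 0 then result + l.getD i 0
                        else result - l.getD i 0) * 2) init := by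
  intro m
  induction m with
  | zero => intro _ _; simp
  | succ m ih =>
    intro hm init
    have hlt : m < l.length := hm
    rw [List.range_succ, List.foldl_append, List.foldl_append,
      ih (Nat.le_of_lt hlt) init]
    simp only [List.foldl_cons, List.foldl_nil]
    simp [List.getD_eq_getElem?_getD, List.getElem?_append_left hlt]

theorem dds_snoc (l : List Int) (x : Int) :
    dds (l ++ [x])
      = (if l.length % 2 == 0 then dds l + x else dds l - x) * 2 := by
  unfold dds
  rw [List.length_append, List.length_cons, List.length_nil, Nat.add_zero,
    List.range_succ, List.foldl_append, ddsA_congr l x l.length (Nat.le_refl _)]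
  simp only [List.foldl_cons, List.foldl_nil]
  simp [List.getD_eq_getElem?_getD]

-- ===== VERDICT (by name: the statement is the Claim_ definition above) =====
theorem dds_spec : Claim_equal_dds := by
  intro lst hdom
  clear hdom
  show dds lst = dds_alt lst
  induction lst using List.reverseRecOn with
  | nil => decide
  | append_singleton l x ih =>
    rw [dds_snoc, dds_alt_closed, List.reverse_append, List.reverse_singleton,
      List.singleton_append]
    rw [dds_alt_closed] at ih
    simp only [ddsH]
    rw [show (2 : Int) * 2 = 2 * 2 from rfl, ddsH_double]
    rw [List.length_append, List.length_cons, List.length_nil, Nat.add_zero]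
    simp only [beq_iff_eq] at ih ⊢
    split_ifs at ih ⊢ with h1 h2 h3 <;> push_cast at * <;> omega
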